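-- pv_equiv track=rewrite | github.com/AlperCamli/Real-time-Data-Streaming-for-EV-Chargers | src/benchmarks/metrics_snapshot.py | _parse_label_key
-- ===== SOURCE A (Python) =====
-- def _parse_label_key(labels_blob: str | None) -> tuple[tuple[str, str], ...]:
--     if not labels_blob:
--         return ()
--
--     labels: dict[str, str] = {}
--     for part in _split_labels(labels_blob):
--         if "=" not in part:
--             continue
--         key, raw_value = part.split("=", 1)
--         labels[key.strip()] = _decode_label_value(raw_value.strip())
--     return tuple(sorted(labels.items()))
--
-- def _split_labels(blob: str) -> list[str]:
--     parts: list[str] = []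
--     current: list[str] = []
--     in_quotes = False
--     escape = False
--     for char in blob:
--         if escape:
--             current.append(char)
--             escape = False
--             continue
--         if char == "\\":
--             current.append(char)
--             escape = True
--             continue
--         if char == '"':
--             in_quotes = not in_quotes
--             current.append(char)
--             continue
--         if char == "," and not in_quotes:
--             part = "".join(current).strip()
--             if part:
--                 parts.append(part)
--             current = []
--             continue
--         current.append(char)
--
--     tail = "".join(current).strip()
--     if tail:
--         parts.append(tail)
--     return parts
--
-- def _decode_label_value(raw_value: str) -> str:
--     value = raw_value
--     if value.startswith('"') and value.endswith('"'):
--         value = value[1:-1]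
--     return value.replace('\\"', '"').replace("\\\\", "\\")
-- ===== SOURCE B (Python) =====
-- def _parse_label_key(labels_blob):
--     # Single fused char-by-char tokenizer: no intermediate parts list.
--     if not labels_blob:
--         return ()
--     labels = {}
--     key, val = [], []
--     after_eq = in_quotes = escape = False
--
--     def emit(c):
--         nonlocal after_eq
--         if c == "=" and not after_eq:
--             after_eq = True
--         elif after_eq:
--             val.append(c)
--         else:
--             key.append(c)
--
--     def flush():
--         nonlocal key, val, after_eq
--         if after_eq:
--             raw = "".join(val).strip()
--             if raw.startswith('"') and raw.endswith('"'):
--                 raw = raw[1:-1]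
--             labels["".join(key).strip()] = raw.replace('\\"', '"').replace("\\\\", "\\")
--         key, val, after_eq = [], [], False
--
--     for c in labels_blob:
--         if escape:
--             emit(c)
--             escape = False
--         elif c == "\\":
--             emit(c)
--             escape = True
--         elif c == '"':
--             in_quotes = not in_quotes
--             emit(c)
--         elif c == "," and not in_quotes:
--             flush()
--         else:
--             emit(c)
--     flush()
--     return tuple(sorted(labels.items()))
-- ===== Notes on version B (the rewrite author's own statement) =====
-- stated objective: alternative
-- what changed: A splits the blob into a parts list and then re-splits/strips each part on '='; B is a single fused char-by-char tokenizer that maintains separate key/value buffers and an after-equals flag and finalizes each pair directly at each unquoted comma, with no intermediate parts list.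
import Mathlib
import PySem

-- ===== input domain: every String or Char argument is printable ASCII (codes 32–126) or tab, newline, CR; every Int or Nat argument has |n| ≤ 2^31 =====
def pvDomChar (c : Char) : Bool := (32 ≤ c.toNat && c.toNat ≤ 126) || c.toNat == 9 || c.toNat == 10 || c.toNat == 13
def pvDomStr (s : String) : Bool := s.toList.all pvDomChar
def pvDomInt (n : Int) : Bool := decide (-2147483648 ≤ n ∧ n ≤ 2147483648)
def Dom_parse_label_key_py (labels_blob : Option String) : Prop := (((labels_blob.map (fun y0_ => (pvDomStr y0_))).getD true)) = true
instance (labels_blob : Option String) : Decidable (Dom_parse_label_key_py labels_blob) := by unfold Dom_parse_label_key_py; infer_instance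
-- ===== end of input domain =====

-- B re-implements A's two-phase parse (split into parts, then re-split each part on '=')
-- as one fused char-by-char tokenizer keeping separate key/value buffers; objective:
-- alternative decomposition, same asymptotic cost.

-- ===== PORT A =====

-- _decode_label_value
def pvDecode (raw_value : List Char) : List Char :=
  let value :=
    if PySem.Chars.startswith raw_value ['"'] && PySem.Chars.endswith raw_value ['"'] then
      PySem.Chars.slice raw_value (some 1) (some (-1))
    else raw_value
  PySem.Chars.replace (PySem.Chars.replace value ['\\', '"'] ['"']) ['\\', '\\'] ['\\']

-- one iteration of the char loop in _split_labels; state = (parts, current, in_quotes, escape)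
def pvSplitStep (st : List (List Char) × List Char × Bool × Bool) (c : Char) :
    List (List Char) × List Char × Bool × Bool :=
  let parts := st.1; let current := st.2.1; let inq := st.2.2.1; let esc := st.2.2.2
  if esc then (parts, current ++ [c], inq, false)
  else if c = '\\' then (parts, current ++ [c], inq, true)
  else if c = '"' then (parts, current ++ [c], !inq, esc)
  else if c = ',' && !inq then
    let part := PySem.Chars.strip current
    ((if part = [] then parts else parts ++ [part]), [], inq, esc)
  else (parts, current ++ [c], inq, esc)

-- _split_labels
def pvSplitLabels (blob : List Char) : List (List Char) :=
  let st := blob.foldl pvSplitStep ([], [], false, false)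
  let tail := PySem.Chars.strip st.2.1
  if tail = [] then st.1 else st.1 ++ [tail]

-- body of the 'for part in _split_labels(...)' loop ('key, raw_value = part.split("=", 1)')
def pvAStep (d : PySem.Dict String String) (part : List Char) : PySem.Dict String String :=
  if PySem.Chars.isIn ['='] part then
    match PySem.Chars.splitOnMax part ['='] 1 with
    | key :: raw_value :: _ =>
        d.insert (String.ofList (PySem.Chars.strip key))
                 (String.ofList (pvDecode (PySem.Chars.strip raw_value)))
    | _ => d   -- unreachable: split with '=' present yields two pieces
  else d

def parse_label_key_py (labels_blob : Option String) : List (String × String) :=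
  match labels_blob with
  | none => []
  | some s =>
    if s.toList = [] then []          -- 'if not labels_blob'
    else
      let d := (pvSplitLabels s.toList).foldl pvAStep PySem.Dict.empty
      PySem.List.sorted2 d.items (fun p => p.1) (fun p => p.2) false

-- ===== PORT B =====

-- B's emit(c): first unconsumed '=' flips after_eq; other chars go to the live buffer
def pvEmit (kv : List Char × List Char × Bool) (c : Char) : List Char × List Char × Bool :=
  if c = '=' && !kv.2.2 then (kv.1, kv.2.1, true)
  else if kv.2.2 then (kv.1, kv.2.1 ++ [c], kv.2.2)
  else (kv.1 ++ [c], kv.2.1, kv.2.2)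

-- B's flush(): record the pair iff an '=' was seen; decode logic as inlined in Source B's flush
def pvDecodeB (raw : List Char) : List Char :=
  let v :=
    if PySem.Chars.startswith raw ['"'] && PySem.Chars.endswith raw ['"'] then
      PySem.Chars.slice raw (some 1) (some (-1))
    else raw
  PySem.Chars.replace (PySem.Chars.replace v ['\\', '"'] ['"']) ['\\', '\\'] ['\\']

def pvFlush (d : PySem.Dict String String) (key val : List Char) (afterEq : Bool) :
    PySem.Dict String String :=
  if afterEq then
    d.insert (String.ofList (PySem.Chars.strip key))
             (String.ofList (pvDecodeB (PySem.Chars.strip val)))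
  else d

-- one iteration of B's char loop; state = (labels, key, val, after_eq, in_quotes, escape)
def pvBStep (st : PySem.Dict String String × List Char × List Char × Bool × Bool × Bool)
    (c : Char) : PySem.Dict String String × List Char × List Char × Bool × Bool × Bool :=
  let d := st.1; let key := st.2.1; let val := st.2.2.1; let ae := st.2.2.2.1
  let inq := st.2.2.2.2.1; let esc := st.2.2.2.2.2
  if esc then let e := pvEmit (key, val, ae) c; (d, e.1, e.2.1, e.2.2, inq, false)
  else if c = '\\' then let e := pvEmit (key, val, ae) c; (d, e.1, e.2.1, e.2.2, inq, true)
  else if c = '"' then let e := pvEmit (key, val, ae) c; (d, e.1, e.2.1, e.2.2, !inq, esc)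
  else if c = ',' && !inq then (pvFlush d key val ae, [], [], false, inq, esc)
  else let e := pvEmit (key, val, ae) c; (d, e.1, e.2.1, e.2.2, inq, esc)

def parse_label_key_py_alt (labels_blob : Option String) : List (String × String) :=
  match labels_blob with
  | none => []
  | some s =>
    if s.toList = [] then []          -- 'if not labels_blob'
    else
      let st := s.toList.foldl pvBStep (PySem.Dict.empty, [], [], false, false, false)
      let d := pvFlush st.1 st.2.1 st.2.2.1 st.2.2.2.1
      PySem.List.sorted2 d.items (fun p => p.1) (fun p => p.2) false

-- ===== PRECONDITION & SPEC =====
def Spec_parse_label_key_py (labels_blob : Option String) (out : List (String × String)) : Prop := out = parse_label_key_py_alt labels_blob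
instance (labels_blob : Option String) (out : List (String × String)) : Decidable (Spec_parse_label_key_py labels_blob out) := by unfold Spec_parse_label_key_py; infer_instance

-- ===== CLAIM (what is proved, stated in full; the proofs are below) =====
def Claim_equal_parse_label_key_py : Prop := ∀ (labels_blob : Option String), Dom_parse_label_key_py labels_blob → Spec_parse_label_key_py labels_blob (parse_label_key_py labels_blob)

-- ===== LEMMAS AND PROOFS =====

-- proof-only helpers: the finalisation of each loop's state
def pvFinishA (st : List (List Char) × List Char × Bool × Bool) : PySem.Dict String String :=
  (if PySem.Chars.strip st.2.1 = [] then st.1 else st.1 ++ [PySem.Chars.strip st.2.1]).foldl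
    pvAStep PySem.Dict.empty

def pvFinishB (st : PySem.Dict String String × List Char × List Char × Bool × Bool × Bool) :
    PySem.Dict String String :=
  pvFlush st.1 st.2.1 st.2.2.1 st.2.2.2.1

theorem pv_not_isspace_eq : PySem.Chars.isspace '=' = false := by decide

theorem pv_lstrip_append_eq (k v : List Char) :
    PySem.Chars.lstrip (k ++ '=' :: v) = PySem.Chars.lstrip k ++ '=' :: v := by
  simp only [PySem.Chars.lstrip, List.dropWhile_append]
  split_ifs with h
  · rw [List.isEmpty_iff] at h
    simp [h, pv_not_isspace_eq]
  · rfl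

theorem pv_rstrip_append_eq (k v : List Char) :
    PySem.Chars.rstrip (k ++ '=' :: v) = k ++ '=' :: PySem.Chars.rstrip v := by
  simp only [PySem.Chars.rstrip, List.reverse_append, List.reverse_cons]
  rw [List.append_assoc, List.dropWhile_append]
  split_ifs with h
  · rw [List.isEmpty_iff] at h
    simp [h, pv_not_isspace_eq]
  · simp

theorem pv_strip_append_eq (k v : List Char) :
    PySem.Chars.strip (k ++ '=' :: v) =
      PySem.Chars.lstrip k ++ '=' :: PySem.Chars.rstrip v := by
  simp only [PySem.Chars.strip]
  rw [pv_lstrip_append_eq, pv_rstrip_append_eq]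

theorem pv_mem_lstrip {a : Char} {s : List Char} (h : a ∈ PySem.Chars.lstrip s) : a ∈ s := by
  simp only [PySem.Chars.lstrip] at h
  exact (List.dropWhile_sublist _).mem h

theorem pv_mem_rstrip {a : Char} {s : List Char} (h : a ∈ PySem.Chars.rstrip s) : a ∈ s := by
  simp only [PySem.Chars.rstrip, List.mem_reverse] at h
  exact List.mem_reverse.mp ((List.dropWhile_sublist _).mem h)

theorem pv_mem_strip {a : Char} {s : List Char} (h : a ∈ PySem.Chars.strip s) : a ∈ s := by
  exact pv_mem_lstrip (pv_mem_rstrip h)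

theorem pv_lstrip_idem (s : List Char) :
    PySem.Chars.lstrip (PySem.Chars.lstrip s) = PySem.Chars.lstrip s := by
  simp only [PySem.Chars.lstrip]
  exact List.dropWhile_idempotent _ _

theorem pv_rstrip_idem (s : List Char) :
    PySem.Chars.rstrip (PySem.Chars.rstrip s) = PySem.Chars.rstrip s := by
  simp only [PySem.Chars.rstrip, List.reverse_reverse]
  rw [List.dropWhile_idempotent]

theorem pv_rstrip_cons (x : Char) (s : List Char) :
    PySem.Chars.rstrip (x :: s) =
      (if PySem.Chars.rstrip s = [] then (if PySem.Chars.isspace x then [] else [x])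
       else x :: PySem.Chars.rstrip s) := by
  simp only [PySem.Chars.rstrip, List.reverse_cons, List.dropWhile_append]
  by_cases h : List.dropWhile PySem.Chars.isspace s.reverse = []
  · simp [h, List.dropWhile_cons]
    by_cases hx : PySem.Chars.isspace x <;> simp [hx]
  · have h2 : (List.dropWhile PySem.Chars.isspace s.reverse).isEmpty = false := by
      simpa [List.isEmpty_iff] using h
    have h3 : ¬ (List.dropWhile PySem.Chars.isspace s.reverse).reverse = [] := by
      simpa using h
    simp [h2, h3]

theorem pv_rstrip_cons_not_space (x : Char) (s : List Char)
    (hx : PySem.Chars.isspace x = false) :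
    PySem.Chars.rstrip (x :: s) = x :: PySem.Chars.rstrip s := by
  rw [pv_rstrip_cons, hx]
  by_cases h : PySem.Chars.rstrip s = []
  · simp [h]
  · simp [h]

theorem pv_lstrip_cons (x : Char) (s : List Char) :
    PySem.Chars.lstrip (x :: s) =
      (if PySem.Chars.isspace x then PySem.Chars.lstrip s else x :: s) := by
  simp only [PySem.Chars.lstrip, List.dropWhile_cons]

theorem pv_lstrip_rstrip_comm (s : List Char) :
    PySem.Chars.lstrip (PySem.Chars.rstrip s) = PySem.Chars.rstrip (PySem.Chars.lstrip s) := by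
  induction s with
  | nil => rfl
  | cons x s ih =>
    by_cases hx : PySem.Chars.isspace x
    · have hx' : PySem.Chars.isspace x = true := hx
      by_cases h : PySem.Chars.rstrip s = []
      · rw [pv_rstrip_cons, pv_lstrip_cons]
        simp only [hx', h, if_true]
        rw [← ih, h]
      · rw [pv_rstrip_cons, pv_lstrip_cons]
        simp only [hx', if_true, if_neg h]
        rw [pv_lstrip_cons]
        simp only [hx', if_true]
        exact ih
    · have hx' : PySem.Chars.isspace x = false := by simpa using hx
      rw [pv_rstrip_cons_not_space x s hx', pv_lstrip_cons, pv_lstrip_cons]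
      simp only [hx', Bool.false_eq_true, if_false]
      rw [pv_rstrip_cons_not_space x s hx']

theorem pv_strip_lstrip (s : List Char) :
    PySem.Chars.strip (PySem.Chars.lstrip s) = PySem.Chars.strip s := by
  simp only [PySem.Chars.strip]
  rw [pv_lstrip_idem]

theorem pv_strip_rstrip (s : List Char) :
    PySem.Chars.strip (PySem.Chars.rstrip s) = PySem.Chars.strip s := by
  simp only [PySem.Chars.strip]
  rw [pv_lstrip_rstrip_comm, pv_rstrip_idem]

theorem pv_isIn_eq_iff (s : List Char) : PySem.Chars.isIn ['='] s = true ↔ '=' ∈ s := by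
  rw [PySem.Chars.isIn_iff_infix]
  constructor
  · rintro ⟨u, t, rfl⟩; simp
  · intro h
    obtain ⟨u, t, rfl⟩ := List.append_of_mem h
    exact ⟨u, t, by simp⟩

theorem pv_go_m0 (fuel : Nat) (l cur : List Char) (acc : List (List Char)) :
    PySem.Chars.splitOnMax.go ['='] fuel 0 l cur acc = ((cur.reverse ++ l) :: acc).reverse := by
  cases fuel with
  | zero => rw [PySem.Chars.splitOnMax.go]
  | succ f =>
    cases l with
    | nil =>
      rw [PySem.Chars.splitOnMax.go]
      · simp
      · omega
    | cons c rest =>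
      rw [PySem.Chars.splitOnMax.go]
      simp

theorem pv_splitOnMax_go (rv : List Char) :
    ∀ (lk : List Char) (fuel : Nat) (cur : List Char) (acc : List (List Char)),
      lk.length < fuel → '=' ∉ lk →
      PySem.Chars.splitOnMax.go ['='] fuel 1 (lk ++ '=' :: rv) cur acc =
        acc.reverse ++ [cur.reverse ++ lk, rv] := by
  intro lk
  induction lk with
  | nil =>
    intro fuel cur acc hf _
    cases fuel with
    | zero => omega
    | succ f =>
      simp only [List.nil_append]
      rw [PySem.Chars.splitOnMax.go]
      have hpre : List.isPrefixOf ['='] ('=' :: rv) = true := by simp [List.isPrefixOf]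
      simp only [hpre, if_true]
      norm_num
      rw [pv_go_m0]
      simp
  | cons a lk ih =>
    intro fuel cur acc hf hmem
    have ha : a ≠ '=' := fun h => hmem (by simp [h])
    cases fuel with
    | zero => simp at hf
    | succ f =>
      simp only [List.cons_append]
      rw [PySem.Chars.splitOnMax.go]
      have hpre : List.isPrefixOf ['='] (a :: (lk ++ '=' :: rv)) = false := by
        simp [List.isPrefixOf, Ne.symm ha]
      simp only [hpre, Bool.false_eq_true, if_false]
      norm_num
      rw [ih f (a :: cur) acc (by simp at hf ⊢; omega) (fun h => hmem (by simp [h]))]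
      simp

theorem pv_splitOnMax_eq (lk rv : List Char) (h : '=' ∉ lk) :
    PySem.Chars.splitOnMax (lk ++ '=' :: rv) ['='] 1 = [lk, rv] := by
  rw [PySem.Chars.splitOnMax]
  norm_num
  rw [pv_splitOnMax_go rv lk _ [] [] (by simp) h]
  simp

-- the segment lemma: finishing one raw segment does the same to the dict on both sides
theorem pv_segment (parts : List (List Char)) (key val current : List Char) (ae : Bool)
    (hk : '=' ∉ key) (hv : ae = false → val = [])
    (hcur : current = key ++ (if ae then '=' :: val else [])) :
    ((if PySem.Chars.strip current = [] then parts
      else parts ++ [PySem.Chars.strip current]).foldl pvAStep PySem.Dict.empty) =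
      pvFlush (parts.foldl pvAStep PySem.Dict.empty) key val ae := by
  cases ae with
  | false =>
    have hc : current = key := by simpa using hcur
    subst hc
    simp only [pvFlush, Bool.false_eq_true, if_false]
    by_cases hp : PySem.Chars.strip current = []
    · simp [hp]
    · simp only [hp, if_false]
      rw [List.foldl_append]
      simp only [List.foldl_cons, List.foldl_nil]
      have hno : PySem.Chars.isIn ['='] (PySem.Chars.strip current) = false := by
        cases h2 : PySem.Chars.isIn ['='] (PySem.Chars.strip current)
        · rfl
        · exact absurd (pv_mem_strip ((pv_isIn_eq_iff _).mp h2)) hk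
      simp [pvAStep, hno]
  | true =>
    have hc : current = key ++ '=' :: val := by simpa using hcur
    subst hc
    rw [pv_strip_append_eq]
    have hne : PySem.Chars.lstrip key ++ '=' :: PySem.Chars.rstrip val ≠ [] := by simp
    rw [if_neg hne, List.foldl_append]
    simp only [List.foldl_cons, List.foldl_nil]
    have hin : PySem.Chars.isIn ['='] (PySem.Chars.lstrip key ++ '=' :: PySem.Chars.rstrip val)
        = true := (pv_isIn_eq_iff _).mpr (by simp)
    have hknot : '=' ∉ PySem.Chars.lstrip key := fun hm => hk (pv_mem_lstrip hm)
    simp only [pvAStep, hin, if_true, pv_splitOnMax_eq _ _ hknot]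
    rw [pv_strip_lstrip, pv_strip_rstrip]
    have hdec : pvDecode = pvDecodeB := rfl
    simp [pvFlush, hdec]

theorem pv_emit_inv (key val : List Char) (ae : Bool) (c : Char)
    (hk : '=' ∉ key) (hv : ae = false → val = []) :
    '=' ∉ (pvEmit (key, val, ae) c).1 ∧
    ((pvEmit (key, val, ae) c).2.2 = false → (pvEmit (key, val, ae) c).2.1 = []) ∧
    (key ++ (if ae then '=' :: val else [])) ++ [c] =
      (pvEmit (key, val, ae) c).1 ++
        (if (pvEmit (key, val, ae) c).2.2 then '=' :: (pvEmit (key, val, ae) c).2.1 else []) := by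
  simp only [pvEmit]
  by_cases h1 : (c = '=' && !ae) = true
  · obtain ⟨hc, hae⟩ : c = '=' ∧ ae = false := by
      constructor
      · exact of_decide_eq_true (Bool.and_elim_left h1)
      · simpa using Bool.and_elim_right h1
    subst hc hae
    simp [hv rfl, hk]
  · simp only [h1]
    cases ae with
    | true => simp [hk]
    | false =>
      have hc : c ≠ '=' := by
        intro h; subst h; simp at h1
      have hc' : ¬('=' = c) := fun h => hc h.symm
      simp [hv rfl, hk, hc']

-- the loop invariant: A's split loop + dict fold tracks B's fused loop
theorem pv_loop (cs : List Char) :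
    ∀ (parts : List (List Char)) (current key val : List Char) (ae inq esc : Bool),
      '=' ∉ key → (ae = false → val = []) →
      current = key ++ (if ae then '=' :: val else []) →
      pvFinishA (cs.foldl pvSplitStep (parts, current, inq, esc)) =
        pvFinishB (cs.foldl pvBStep
          (parts.foldl pvAStep PySem.Dict.empty, key, val, ae, inq, esc)) := by
  induction cs with
  | nil =>
    intro parts current key val ae inq esc hk hv hcur
    simpa [pvFinishA, pvFinishB] using pv_segment parts key val current ae hk hv hcur
  | cons c cs ih =>
    intro parts current key val ae inq esc hk hv hcur
    obtain ⟨hk', hv', hcur'⟩ := pv_emit_inv key val ae c hk hv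
    rw [← hcur] at hcur'
    simp only [List.foldl_cons]
    by_cases hesc : esc = true
    · subst hesc
      simp only [pvSplitStep, pvBStep, if_true]
      exact ih parts (current ++ [c]) _ _ _ inq false hk' hv' hcur'
    · have hesc' : esc = false := by simpa using hesc
      subst hesc'
      by_cases hbs : c = '\\'
      · subst hbs
        simp only [pvSplitStep, pvBStep, Bool.false_eq_true, if_false, if_true]
        exact ih parts (current ++ ['\\']) _ _ _ inq true hk' hv' hcur'
      · by_cases hq : c = '"'
        · subst hq
          have hbs' : ¬(('"' : Char) = '\\') := by decide
          simp only [pvSplitStep, pvBStep, Bool.false_eq_true, if_false, if_neg hbs',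
            if_true]
          exact ih parts (current ++ ['"']) _ _ _ (!inq) false hk' hv' hcur'
        · by_cases hcm : (c = ',' && !inq) = true
          · simp only [pvSplitStep, pvBStep, Bool.false_eq_true, if_false, if_neg hbs,
              if_neg hq, hcm, if_true]
            rw [ih _ [] [] [] false inq false (by simp) (fun _ => rfl) (by simp)]
            rw [pv_segment parts key val current ae hk hv hcur]
          · simp only [pvSplitStep, pvBStep, Bool.false_eq_true, if_false, if_neg hbs,
              if_neg hq, hcm]
            exact ih parts (current ++ [c]) _ _ _ inq false hk' hv' hcur'

-- ===== VERDICT (by name: the statement is the Claim_ definition above) =====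
theorem parse_label_key_py_spec : Claim_equal_parse_label_key_py := by
  intro labels_blob _hdom
  unfold Spec_parse_label_key_py parse_label_key_py parse_label_key_py_alt
  match labels_blob with
  | none => rfl
  | some s =>
    by_cases hs : s.toList = []
    · simp [hs]
    · simp only [hs, if_false]
      have h := pv_loop s.toList [] [] [] [] false false false (by simp) (fun _ => rfl) (by simp)
      simp only [List.foldl_nil] at h
      simp only [pvFinishA, pvFinishB] at h
      unfold pvSplitLabels
      rw [h]
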